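-- pv_equiv track=rewrite | github.com/GMainardi/Advent-2023 | day14/a.py | gravity_up
-- ===== SOURCE A (Python) =====
-- def gravity_up(moving_rocks, static_rocks, col):
--
--     floors = [x[0] for x in static_rocks if x[1] == col] + [-1]
--     floors.sort()
--
--     rocks = [x[0] for x in moving_rocks if x[1] == col]
--     rocks.sort()
--
--     floor_idx = 0
--     new_rocks = []
--
--     for rock in rocks:
--
--         while floor_idx+1 < len(floors) and rock > floors[floor_idx+1]:
--             floor_idx += 1
--
--         floors[floor_idx] += 1
--         new_rocks.append((floors[floor_idx], col))
--
--     return set(new_rocks)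
-- ===== SOURCE B (Python) =====
-- def gravity_up(moving_rocks, static_rocks, col):
--     floors = sorted([x[0] for x in static_rocks if x[1] == col] + [-1])
--     # one unsorted pass: binary-search each rock's gap, count rocks per gap
--     counts = {}
--     for rock, c in moving_rocks:
--         if c != col:
--             continue
--         lo, hi = 0, len(floors)
--         while lo < hi:
--             mid = (lo + hi) // 2
--             if floors[mid] < rock:
--                 lo = mid + 1
--             else:
--                 hi = mid
--         gap = lo - 1 if lo > 0 else 0
--         counts[gap] = counts.get(gap, 0) + 1
--     # emit each gap's pile just above its floor
--     placed = set()
--     for i in range(len(floors)):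
--         n = counts.get(i, 0)
--         base = floors[i]
--         for k in range(1, n + 1):
--             placed.add((base + k, col))
--     return placed
-- ===== Notes on version B (the rewrite author's own statement) =====
-- stated objective: alternative
-- what changed: A sorts the moving rocks and sweeps them with a mutating floor pointer over the floors list; B never sorts the rocks: it binary-searches each rock's supporting floor in one unsorted pass to build a per-gap count table, then a second pass emits each gap's pile of positions directly above its floor.
import Mathlib
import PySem

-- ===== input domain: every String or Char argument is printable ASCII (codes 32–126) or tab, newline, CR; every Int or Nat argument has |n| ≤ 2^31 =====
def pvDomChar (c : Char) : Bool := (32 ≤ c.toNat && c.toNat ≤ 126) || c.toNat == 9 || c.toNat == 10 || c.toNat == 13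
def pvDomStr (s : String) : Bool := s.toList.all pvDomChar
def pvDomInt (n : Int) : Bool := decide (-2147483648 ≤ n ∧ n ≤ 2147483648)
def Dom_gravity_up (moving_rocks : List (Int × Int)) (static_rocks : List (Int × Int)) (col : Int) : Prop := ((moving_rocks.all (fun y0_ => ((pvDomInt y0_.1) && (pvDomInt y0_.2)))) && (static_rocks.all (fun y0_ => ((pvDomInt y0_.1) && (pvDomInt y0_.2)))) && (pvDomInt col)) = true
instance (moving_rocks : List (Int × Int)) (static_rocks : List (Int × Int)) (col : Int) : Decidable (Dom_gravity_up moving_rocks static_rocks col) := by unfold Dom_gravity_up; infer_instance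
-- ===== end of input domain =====

-- B replaces A's sorted-rocks mutating two-pointer sweep by an unsorted one-pass binary-search
-- count table per gap followed by a per-gap emission pass (objective: alternative decomposition).

-- ===== PORT A =====
-- the inner 'while floor_idx+1 < len(floors) and rock > floors[floor_idx+1]' loop
def pvAdvance (floors : List Int) (idx : Nat) (rock : Int) : Nat :=
  if h : idx + 1 < floors.length ∧ rock > floors.getD (idx + 1) 0 then
    pvAdvance floors (idx + 1) rock
  else idx
termination_by floors.length - idx
decreasing_by omega

def gravity_up (moving_rocks : List (Int × Int)) (static_rocks : List (Int × Int)) (col : Int) : List (Int × Int) :=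
  let floors := PySem.List.sorted ((static_rocks.filter (fun x => x.2 == col)).map (fun x => x.1) ++ [(-1 : Int)]) (fun x => x) false
  let rocks := PySem.List.sorted ((moving_rocks.filter (fun x => x.2 == col)).map (fun x => x.1)) (fun x => x) false
  let st := rocks.foldl (fun (st : List Int × Nat × List (Int × Int)) rock =>
      let fi := pvAdvance st.1 st.2.1 rock
      let v := st.1.getD fi 0 + 1
      (st.1.set fi v, fi, st.2.2 ++ [(v, col)])) (floors, 0, [])
  PySem.Set.ofList st.2.2

-- ===== PORT B =====
-- the hand-written bisect_left loop of Source B ('lo, hi = 0, len(floors); while lo < hi: …')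
def pvBisect (floors : List Int) (rock : Int) (lo hi : Nat) : Nat :=
  if h : lo < hi then
    let mid := (lo + hi) / 2
    if floors.getD mid 0 < rock then pvBisect floors rock (mid + 1) hi
    else pvBisect floors rock lo mid
  else lo
termination_by hi - lo
decreasing_by all_goals omega

def gravity_up_alt (moving_rocks : List (Int × Int)) (static_rocks : List (Int × Int)) (col : Int) : List (Int × Int) :=
  let floors := PySem.List.sorted ((static_rocks.filter (fun x => x.2 == col)).map (fun x => x.1) ++ [(-1 : Int)]) (fun x => x) false
  let counts := moving_rocks.foldl (fun (d : PySem.Dict Nat Int) x =>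
      if x.2 != col then d
      else
        let lo := pvBisect floors x.1 0 floors.length
        let gap := if 0 < lo then lo - 1 else 0
        d.insert gap (d.getD gap 0 + 1)) PySem.Dict.empty
  (List.range floors.length).foldl (fun (placed : PySem.Set (Int × Int)) i =>
      let n := counts.getD i 0
      let base := floors.getD i 0
      (PySem.List.pyRange 1 (n + 1) 1).foldl (fun s k => PySem.Set.add s (base + k, col)) placed)
    PySem.Set.empty

-- ===== PRECONDITION & SPEC =====
def Spec_gravity_up (moving_rocks : List (Int × Int)) (static_rocks : List (Int × Int)) (col : Int) (out : List (Int × Int)) : Prop := out = gravity_up_alt moving_rocks static_rocks col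
instance (moving_rocks : List (Int × Int)) (static_rocks : List (Int × Int)) (col : Int) (out : List (Int × Int)) : Decidable (Spec_gravity_up moving_rocks static_rocks col out) := by unfold Spec_gravity_up; infer_instance

-- ===== CLAIM (what is proved, stated in full; the proofs are below) =====
def Claim_equal_gravity_up : Prop := ∀ (moving_rocks : List (Int × Int)) (static_rocks : List (Int × Int)) (col : Int), Dom_gravity_up moving_rocks static_rocks col → Spec_gravity_up moving_rocks static_rocks col (gravity_up moving_rocks static_rocks col)

-- ===== LEMMAS AND PROOFS =====

-- gap index of a rock: (number of floors strictly below it) - 1, clamped at 0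
def pvGap (fs : List Int) (r : Int) : Nat := fs.countP (fun x => decide (x < r)) - 1

-- the pile of n rocks stacked just above base b
def pvPile (col b : Int) (n : Nat) : List (Int × Int) := (List.range n).map (fun (k : Nat) => (b + 1 + (k : Int), col))

-- number of rocks of rs whose gap is i
def pvCnt (fs : List Int) (rs : List Int) (i : Nat) : Nat := rs.countP (fun r => decide (pvGap fs r = i))

-- the emission sequence from gap s upward: bases from fc, counts from fs-gaps of rs
def pvEmit (col : Int) (fs fc : List Int) (s : Nat) (rs : List Int) : List (Int × Int) :=
  (List.range' s (fc.length - s)).flatMap (fun i => pvPile col (fc.getD i 0) (pvCnt fs rs i))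

lemma pv_prefix_lt (fs : List Int) (r : Int) (hs : fs.Pairwise (· ≤ ·)) :
    ∀ j, j < fs.length → (fs.getD j 0 < r ↔ j < fs.countP (fun x => decide (x < r))) := by
  induction fs with
  | nil => intro j hj; simp at hj
  | cons a t ih =>
    rw [List.pairwise_cons] at hs
    intro j hj
    cases j with
    | zero =>
      simp only [List.getD_cons_zero, List.countP_cons]
      constructor
      · intro h; simp [h]
      · intro h
        by_contra hc
        rw [not_lt] at hc
        have ht : t.countP (fun x => decide (x < r)) = 0 := by
          rw [List.countP_eq_zero]
          intro x hx
          simp only [decide_eq_true_eq, not_lt]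
          exact le_trans hc (hs.1 x hx)
        simp [ht, not_lt.2 hc] at h
    | succ j =>
      simp only [List.getD_cons_succ, List.countP_cons]
      have hj' : j < t.length := by simpa using hj
      rw [ih hs.2 j hj']
      by_cases ha : a < r
      · simp [ha]
      · have ht : t.countP (fun x => decide (x < r)) = 0 := by
          rw [List.countP_eq_zero]
          intro x hx
          simp only [decide_eq_true_eq, not_lt]
          exact le_trans (not_lt.1 ha) (hs.1 x hx)
        have hm : t.getD j 0 ∈ t := by
          rw [List.getD_eq_getElem _ _ hj']; exact List.getElem_mem hj'
        have hge := le_trans (not_lt.1 ha) (hs.1 _ hm)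
        simp [ha, ht]

lemma pv_gap_mono (fs : List Int) {r r' : Int} (h : r ≤ r') : pvGap fs r ≤ pvGap fs r' := by
  have hc : fs.countP (fun x => decide (x < r)) ≤ fs.countP (fun x => decide (x < r')) := by
    apply List.countP_mono_left
    intro x _ hx
    simp only [decide_eq_true_eq] at *
    omega
  unfold pvGap
  omega

lemma pv_gap_lt (fs : List Int) (r : Int) (h : 0 < fs.length) : pvGap fs r < fs.length := by
  have : fs.countP (fun x => decide (x < r)) ≤ fs.length := List.countP_le_length
  unfold pvGap; omega

lemma pv_pile_succ (col b : Int) (n : Nat) :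
    pvPile col b (n + 1) = (b + 1, col) :: pvPile col (b + 1) n := by
  unfold pvPile
  rw [List.range_succ_eq_map, List.map_cons, List.map_map]
  congr 1
  · norm_num
  · apply List.map_congr_left
    intro k _
    simp only [Function.comp_apply, Nat.succ_eq_add_one, Prod.mk.injEq]
    exact ⟨by push_cast; ring, trivial⟩

lemma pv_emit_nil (col : Int) (fs fc : List Int) (s : Nat) : pvEmit col fs fc s [] = [] := by
  simp [pvEmit, pvCnt, pvPile]

lemma pv_emit_peel (col : Int) (fs fc : List Int) (s : Nat) (rs : List Int) (h : s < fc.length) :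
    pvEmit col fs fc s rs = pvPile col (fc.getD s 0) (pvCnt fs rs s) ++ pvEmit col fs fc (s + 1) rs := by
  unfold pvEmit
  have h1 : fc.length - s = (fc.length - (s + 1)) + 1 := by omega
  rw [h1, List.range'_succ, List.flatMap_cons]

lemma pv_emit_congr (col : Int) (fs fc fc' : List Int) (s : Nat) (rs rs' : List Int)
    (hl : fc.length = fc'.length)
    (h : ∀ i, s ≤ i → i < fc.length → fc.getD i 0 = fc'.getD i 0 ∧ pvCnt fs rs i = pvCnt fs rs' i) :
    pvEmit col fs fc s rs = pvEmit col fs fc' s rs' := by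
  unfold pvEmit
  rw [← hl]
  apply List.flatMap_congr
  intro i hi
  rw [List.mem_range'_1] at hi
  obtain ⟨h1, h2⟩ := hi
  have hilt : i < fc.length := by omega
  obtain ⟨ha, hb⟩ := h i h1 hilt
  rw [ha, hb]

lemma pv_emit_skip (col : Int) (fs fc : List Int) (rs : List Int) :
    ∀ n s g, g - s ≤ n → s ≤ g → g ≤ fc.length → (∀ i, s ≤ i → i < g → pvCnt fs rs i = 0) →
    pvEmit col fs fc s rs = pvEmit col fs fc g rs := by
  intro n
  induction n with
  | zero => intro s g h1 h2 _ _; have : s = g := by omega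
            rw [this]
  | succ n ih =>
    intro s g h1 h2 h3 h4
    by_cases hsg : s = g
    · rw [hsg]
    · have hslt : s < g := by omega
      have hsfc : s < fc.length := by omega
      rw [pv_emit_peel col fs fc s rs hsfc, h4 s le_rfl hslt]
      simp only [pvPile, List.range_zero, List.map_nil, List.nil_append]
      exact ih (s+1) g (by omega) (by omega) h3 (fun i hi1 hi2 => h4 i (by omega) hi2)

lemma pv_bisect_eq (fs : List Int) (r : Int) (hs : fs.Pairwise (· ≤ ·)) :
    ∀ n lo hi, hi - lo ≤ n → hi ≤ fs.length → lo ≤ fs.countP (fun x => decide (x < r)) →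
      fs.countP (fun x => decide (x < r)) ≤ hi →
    pvBisect fs r lo hi = fs.countP (fun x => decide (x < r)) := by
  intro n
  induction n with
  | zero =>
    intro lo hi h1 _ h3 h4
    rw [pvBisect]
    have : ¬ lo < hi := by omega
    simp only [this, dite_false]
    omega
  | succ n ih =>
    intro lo hi h1 h2 h3 h4
    rw [pvBisect]
    by_cases hlh : lo < hi
    · simp only [hlh, dite_true]
      have hmid1 : lo ≤ (lo + hi) / 2 := by omega
      have hmid2 : (lo + hi) / 2 < hi := by omega
      have hmlt : (lo + hi) / 2 < fs.length := by omega
      have hch := pv_prefix_lt fs r hs ((lo + hi) / 2) hmlt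
      by_cases hc : fs.getD ((lo + hi) / 2) 0 < r
      · simp only [hc, if_true]
        exact ih ((lo + hi) / 2 + 1) hi (by omega) h2 (by omega) h4
      · simp only [hc, if_false]
        exact ih lo ((lo + hi) / 2) (by omega) (by omega) h3 (by omega)
    · simp only [hlh, dite_false]
      omega

lemma pv_advance_eq (fs fc : List Int) (r : Int) (hs : fs.Pairwise (· ≤ ·))
    (hlen : fc.length = fs.length) :
    ∀ n t, fs.length - t ≤ n → t < fs.length → t ≤ pvGap fs r →
      (∀ j, t < j → j < fs.length → fc.getD j 0 = fs.getD j 0) →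
    pvAdvance fc t r = pvGap fs r := by
  have hcle : fs.countP (fun x => decide (x < r)) ≤ fs.length := List.countP_le_length
  intro n
  induction n with
  | zero => intro t h1 h2; omega
  | succ n ih =>
    intro t h1 h2 h3 h4
    rw [pvAdvance]
    by_cases hcond : t + 1 < fc.length ∧ r > fc.getD (t + 1) 0
    · simp only [hcond]
      obtain ⟨hc1, hc2⟩ := hcond
      have hlt : t + 1 < fs.length := by omega
      rw [h4 (t + 1) (by omega) hlt] at hc2
      have := (pv_prefix_lt fs r hs (t + 1) hlt).1 hc2
      have hgap : t + 1 ≤ pvGap fs r := by unfold pvGap; omega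
      exact ih (t + 1) (by omega) (by unfold pvGap at *; omega) hgap
        (fun j hj1 hj2 => h4 j (by omega) hj2)
    · simp only [hcond, dite_false]
      -- show t = pvGap fs r
      by_cases hc1 : t + 1 < fc.length
      · have hc2 : ¬ r > fc.getD (t + 1) 0 := fun hg => hcond ⟨hc1, hg⟩
        have hlt : t + 1 < fs.length := by omega
        rw [h4 (t + 1) (by omega) hlt] at hc2
        have := (pv_prefix_lt fs r hs (t + 1) hlt).2
        have hnc : ¬ (t + 1 < fs.countP (fun x => decide (x < r))) := by
          intro hcc; exact hc2 (this hcc)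
        unfold pvGap at *; omega
      · unfold pvGap at *; omega

lemma pv_loop (col : Int) (fs : List Int) (hs : fs.Pairwise (· ≤ ·)) :
    ∀ (rs : List Int) (fc : List Int) (s : Nat) (acc : List (Int × Int)),
      fc.length = fs.length → s < fs.length →
      (∀ j, s < j → j < fs.length → fc.getD j 0 = fs.getD j 0) →
      rs.Pairwise (· ≤ ·) → (∀ r ∈ rs, s ≤ pvGap fs r) →
      (rs.foldl (fun (st : List Int × Nat × List (Int × Int)) rock =>
          let fi := pvAdvance st.1 st.2.1 rock
          let v := st.1.getD fi 0 + 1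
          (st.1.set fi v, fi, st.2.2 ++ [(v, col)])) (fc, s, acc)).2.2
        = acc ++ pvEmit col fs fc s rs := by
  intro rs
  induction rs with
  | nil => intro fc s acc _ _ _ _ _; rw [pv_emit_nil]; simp
  | cons r rest ih =>
    intro fc s acc hlen hslt hagree hsorted hge
    have h0 : 0 < fs.length := by omega
    rw [List.pairwise_cons] at hsorted
    obtain ⟨g, hg⟩ : ∃ g, pvGap fs r = g := ⟨_, rfl⟩
    have hsg : s ≤ g := hg ▸ hge r (List.mem_cons_self ..)
    have hglt : g < fs.length := hg ▸ pv_gap_lt fs r h0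
    have hadv : pvAdvance fc s r = g :=
      hg ▸ pv_advance_eq fs fc r hs hlen (fs.length - s) s le_rfl hslt (hg ▸ hsg) hagree
    rw [List.foldl_cons]
    simp only [hadv]
    have hglen : g < fc.length := by omega
    have hlen' : (fc.set g (fc.getD g 0 + 1)).length = fs.length := by
      rw [List.length_set]; exact hlen
    have hget' : ∀ j, j ≠ g → (fc.set g (fc.getD g 0 + 1)).getD j 0 = fc.getD j 0 := by
      intro j hne
      simp only [List.getD_eq_getElem?_getD]
      rw [List.getElem?_set_ne (by omega)]
    have hgetg : (fc.set g (fc.getD g 0 + 1)).getD g 0 = fc.getD g 0 + 1 := by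
      rw [List.getD_eq_getElem _ _ (by rw [List.length_set]; omega)]
      rw [List.getElem_set_self (by omega)]
    have hagree' : ∀ j, g < j → j < fs.length →
        (fc.set g (fc.getD g 0 + 1)).getD j 0 = fs.getD j 0 := by
      intro j hj1 hj2
      rw [hget' j (by omega)]
      exact hagree j (by omega) hj2
    have hge' : ∀ r' ∈ rest, g ≤ pvGap fs r' := by
      intro r' hr'
      exact hg ▸ pv_gap_mono fs (hsorted.1 r' hr')
    rw [ih (fc.set g (fc.getD g 0 + 1)) g (acc ++ [(fc.getD g 0 + 1, col)]) hlen' hglt hagree'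
      hsorted.2 hge']
    rw [List.append_assoc]
    congr 1
    have hskip : pvEmit col fs fc s (r :: rest) = pvEmit col fs fc g (r :: rest) := by
      apply pv_emit_skip col fs fc (r :: rest) (g - s) s g le_rfl hsg (by omega)
      intro i hi1 hi2
      unfold pvCnt
      rw [List.countP_eq_zero]
      intro r' hr'
      simp only [decide_eq_true_eq]
      rcases List.mem_cons.1 hr' with h | h
      · subst h; omega
      · have := hge' r' h; omega
    rw [hskip]
    rw [pv_emit_peel col fs fc g (r :: rest) (by omega)]
    rw [pv_emit_peel col fs (fc.set g (fc.getD g 0 + 1)) g rest (by rw [List.length_set]; omega)]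
    have hcnt_cons : pvCnt fs (r :: rest) g = pvCnt fs rest g + 1 := by
      unfold pvCnt
      rw [List.countP_cons]
      simp [hg]
    have htail : pvEmit col fs (fc.set g (fc.getD g 0 + 1)) (g + 1) rest
        = pvEmit col fs fc (g + 1) (r :: rest) := by
      apply pv_emit_congr col fs _ fc (g + 1) rest (r :: rest) (by rw [List.length_set])
      intro i hi1 hi2
      constructor
      · exact hget' i (by omega)
      · unfold pvCnt
        rw [List.countP_cons]
        simp only [decide_eq_true_eq]
        have : ¬ (pvGap fs r = i) := by omega
        simp [this]
    rw [htail, hgetg, hcnt_cons, pv_pile_succ]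
    simp

lemma pv_foldl_add_flat {α β : Type} [BEq β] (g : α → List Int) (emit : α → Int → β) :
    ∀ (xs : List α) (s : PySem.Set β),
      xs.foldl (fun s a => (g a).foldl (fun s k => PySem.Set.add s (emit a k)) s) s
        = (xs.flatMap (fun a => (g a).map (emit a))).foldl PySem.Set.add s := by
  intro xs
  induction xs with
  | nil => intro s; simp
  | cons a t ih =>
    intro s
    rw [List.foldl_cons, List.flatMap_cons, List.foldl_append, ih]
    congr 1
    rw [List.foldl_map]

lemma pv_fold_filter (col : Int) (fs : List Int) :
    ∀ (l : List (Int × Int)) (d : PySem.Dict Nat Int),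
    (l.foldl (fun (d : PySem.Dict Nat Int) x =>
      if x.2 != col then d
      else
        let lo := pvBisect fs x.1 0 fs.length
        let gap := if 0 < lo then lo - 1 else 0
        d.insert gap (d.getD gap 0 + 1)) d)
    = (((l.filter (fun x => x.2 == col)).map (fun x => x.1)).map
        (fun r => if 0 < pvBisect fs r 0 fs.length then pvBisect fs r 0 fs.length - 1 else 0)).foldl
        (fun d g => d.insert g (d.getD g 0 + 1)) d := by
  intro l
  induction l with
  | nil => intro d; simp
  | cons x t ih =>
    intro d
    by_cases hx : x.2 == col
    · simp only [List.foldl_cons, List.filter_cons, hx, if_true, List.map_cons, bne,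
        Bool.not_eq_eq_eq_not, Bool.not_true]
      rw [← ih]
      congr 1
      simp
    · have hx' : (x.2 == col) = false := by simpa using hx
      simp only [List.foldl_cons, List.filter_cons, hx', Bool.false_eq_true, if_false, bne,
        Bool.not_false, if_true]
      exact ih d

lemma pv_counts_eq (col : Int) (fs : List Int) (moving_rocks : List (Int × Int)) (i : Nat) :
    (moving_rocks.foldl (fun (d : PySem.Dict Nat Int) x =>
      if x.2 != col then d
      else
        let lo := pvBisect fs x.1 0 fs.length
        let gap := if 0 < lo then lo - 1 else 0
        d.insert gap (d.getD gap 0 + 1)) PySem.Dict.empty).getD i 0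
    = (((moving_rocks.filter (fun x => x.2 == col)).map (fun x => x.1)).map
        (fun r => if 0 < pvBisect fs r 0 fs.length then pvBisect fs r 0 fs.length - 1 else 0)).count i := by
  rw [pv_fold_filter]
  rw [PySem.Dict.getD_foldl_insert_add_one]
  simp

lemma pv_pile_pyRange (col b : Int) (m : Nat) :
    (PySem.List.pyRange 1 ((m : Int) + 1) 1).map (fun k => (b + k, col)) = pvPile col b m := by
  rw [PySem.List.pyRange_one]
  have h : ((m : Int) + 1 - 1).toNat = m := by omega
  rw [h, List.map_map]
  unfold pvPile
  apply List.map_congr_left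
  intro k _
  simp only [Function.comp_apply, Prod.mk.injEq]
  exact ⟨by ring, trivial⟩

lemma pv_bridge (mr : List (Int × Int)) (col : Int) (fs : List Int)
    (hfs : fs.Pairwise (· ≤ ·)) (h0 : 0 < fs.length) :
    PySem.Set.ofList ((PySem.List.sorted ((mr.filter (fun x => x.2 == col)).map (fun x => x.1)) (fun x => x) false).foldl
        (fun (st : List Int × Nat × List (Int × Int)) rock =>
          let fi := pvAdvance st.1 st.2.1 rock
          let v := st.1.getD fi 0 + 1
          (st.1.set fi v, fi, st.2.2 ++ [(v, col)])) (fs, 0, [])).2.2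
    = (List.range fs.length).foldl (fun (placed : PySem.Set (Int × Int)) i =>
        (PySem.List.pyRange 1 ((mr.foldl (fun (d : PySem.Dict Nat Int) x =>
            if x.2 != col then d
            else
              let lo := pvBisect fs x.1 0 fs.length
              let gap := if 0 < lo then lo - 1 else 0
              d.insert gap (d.getD gap 0 + 1)) PySem.Dict.empty).getD i 0 + 1) 1).foldl
          (fun s k => PySem.Set.add s (fs.getD i 0 + k, col)) placed) PySem.Set.empty := by
  have hrocks : (PySem.List.sorted ((mr.filter (fun x => x.2 == col)).map (fun x => x.1)) (fun x => x) false).Pairwise (· ≤ ·) := by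
    simpa using PySem.List.sorted_pairwise ((mr.filter (fun x => x.2 == col)).map (fun x => x.1)) (fun x => x)
  rw [pv_loop col fs hfs _ fs 0 [] rfl h0 (fun j _ _ => rfl) hrocks (fun r _ => Nat.zero_le _)]
  rw [pv_foldl_add_flat
    (g := fun i => PySem.List.pyRange 1 ((mr.foldl (fun (d : PySem.Dict Nat Int) x =>
            if x.2 != col then d
            else
              let lo := pvBisect fs x.1 0 fs.length
              let gap := if 0 < lo then lo - 1 else 0
              d.insert gap (d.getD gap 0 + 1)) PySem.Dict.empty).getD i 0 + 1) 1)
    (emit := fun i k => (fs.getD i 0 + k, col))]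
  rw [show (PySem.Set.empty : PySem.Set (Int × Int)) = [] from rfl, ← PySem.Set.ofList_eq_foldl]
  congr 1
  rw [List.nil_append]
  unfold pvEmit
  rw [Nat.sub_zero, ← List.range_eq_range']
  apply List.flatMap_congr
  intro i hi
  rw [List.mem_range] at hi
  rw [pv_counts_eq col fs mr i]
  have hgap : ∀ r : Int, (if 0 < pvBisect fs r 0 fs.length then pvBisect fs r 0 fs.length - 1 else 0) = pvGap fs r := by
    intro r
    have hb := pv_bisect_eq fs r hfs fs.length 0 fs.length (by omega) le_rfl (Nat.zero_le _) List.countP_le_length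
    rw [hb]
    unfold pvGap
    split <;> omega
  rw [List.map_congr_left (fun r _ => hgap r)]
  have hcount : (((mr.filter (fun x => x.2 == col)).map (fun x => x.1)).map (fun r => pvGap fs r)).count i
      = pvCnt fs (PySem.List.sorted ((mr.filter (fun x => x.2 == col)).map (fun x => x.1)) (fun x => x) false) i := by
    unfold pvCnt
    rw [List.count_eq_countP, List.countP_map,
      (PySem.List.sorted_perm ((mr.filter (fun x => x.2 == col)).map (fun x => x.1)) (fun x => x) false).countP_eq]
    apply List.countP_congr
    intro r _
    simp [Function.comp]
  rw [hcount, pv_pile_pyRange]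

-- ===== VERDICT (by name: the statement is the Claim_ definition above) =====
theorem gravity_up_spec : Claim_equal_gravity_up := by
  intro mr sr col _
  unfold Spec_gravity_up gravity_up gravity_up_alt
  dsimp only
  apply pv_bridge
  · simpa using PySem.List.sorted_pairwise ((sr.filter (fun x => x.2 == col)).map (fun x => x.1) ++ [(-1 : Int)]) (fun x => x)
  · rw [PySem.List.length_sorted]
    simp
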